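-- pv_equiv track=rewrite | github.com/SidhaarthShree07/txt-to-ppt-generator | src/multi_placeholder_handler.py | _auto_split_content
-- ===== SOURCE A (Python) =====
-- from typing import Dict, List, Any, Optional, Tuple
--
-- def _auto_split_content(content_list: List[str], max_placeholders: int = 4) -> List[List[str]]:
--     """
--     Automatically split content into groups for multiple placeholders.
--
--     Args:
--         content_list: List of content items
--         max_placeholders: Maximum number of placeholder groups to create
--
--     Returns:
--         List of content groups
--     """
--     if not content_list:
--         return [[]]
--
--     # Clean content list
--     clean_content = [item for item in content_list if item and str(item).strip()]
--     if not clean_content: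
--         return [[]]
--
--     num_items = len(clean_content)
--
--     # IMPORTANT: Always split content when we have multiple placeholders
--     # Even if we have few items, distribute them across placeholders
--
--     if max_placeholders <= 1:
--         return [clean_content]
--
--     # Calculate items per placeholder
--     items_per_placeholder = max(1, num_items // max_placeholders)
--     remainder = num_items % max_placeholders
--
--     groups = []
--     start_idx = 0
--
--     for i in range(max_placeholders):
--         # Distribute items evenly, with extra items going to first groups
--         items_for_this_group = items_per_placeholder + (1 if i < remainder else 0)
--
--         if start_idx < num_items:
--             end_idx = min(start_idx + items_for_this_group, num_items)
--             group = clean_content[start_idx:end_idx]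
--             if group:  # Only add non-empty groups
--                 groups.append(group)
--             start_idx = end_idx
--
--     # If we have fewer items than placeholders, create minimal groups
--     if len(groups) < max_placeholders and num_items > 0:
--         # Redistribute to ensure we use more placeholders
--         if num_items >= max_placeholders:
--             # We have enough items, distribute one per placeholder and extras to first
--             groups = []
--             for i in range(min(num_items, max_placeholders)):
--                 groups.append([clean_content[i]])
--             # Add remaining items to existing groups
--             for i in range(max_placeholders, num_items):
--                 groups[i % len(groups)].append(clean_content[i])
--         else:
--             # We have fewer items than placeholders, put one item per group
--             groups = [[item] for item in clean_content]
--
--     return groups if groups else [[]]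
-- ===== SOURCE B (Python) =====
-- def _auto_split_content(content_list, max_placeholders=4):
--     if not content_list:
--         return [[]]
--     clean = [item for item in content_list if item and str(item).strip()]
--     if not clean:
--         return [[]]
--     if max_placeholders <= 1:
--         return [clean]
--     # greedy ceiling peel: each group takes ceil(remaining / slots_left) items
--     groups = []
--     start = 0
--     n = len(clean)
--     k = max_placeholders
--     while start < n:
--         if k == 1:
--             groups.append(clean[start:])
--             break
--         size = -((start - n) // k)
--         groups.append(clean[start:start + size])
--         start += size
--         k -= 1
--     return groups
-- ===== Notes on version B (the rewrite author's own statement) =====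
-- stated objective: alternative
-- what changed: Replaced A's two-phase build-then-redistribute structure (floor-division sizes with a remainder counter, a guarded slicing loop, then a singleton-redistribution pass) by a single greedy ceiling peel: each iteration takes ceil(remaining/slots_left) items off the front, which yields balanced groups and degenerates to singletons by itself, so no second pass exists.
import Mathlib
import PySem

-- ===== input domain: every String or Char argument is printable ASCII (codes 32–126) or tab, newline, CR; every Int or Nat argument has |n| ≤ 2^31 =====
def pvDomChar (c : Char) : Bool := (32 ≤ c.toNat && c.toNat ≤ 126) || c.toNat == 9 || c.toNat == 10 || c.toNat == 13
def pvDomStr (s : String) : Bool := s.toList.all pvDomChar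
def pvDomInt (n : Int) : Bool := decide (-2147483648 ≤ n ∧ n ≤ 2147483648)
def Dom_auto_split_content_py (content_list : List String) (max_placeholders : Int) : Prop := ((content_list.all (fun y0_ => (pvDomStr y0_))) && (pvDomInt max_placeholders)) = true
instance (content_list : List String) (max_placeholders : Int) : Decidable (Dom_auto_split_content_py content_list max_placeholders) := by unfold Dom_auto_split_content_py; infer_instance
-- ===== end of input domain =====

-- B replaces A's two-phase build-then-redistribute loop by a recursive ceiling-division
-- peel (cut a ceil(len/k)-sized head group, recurse with k-1 slots); objective: alternative.


-- ===== PORT A =====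
-- loop body of A's first (slicing) for-loop, as a named helper
def pvStepA (clean : List String) (num_items per rem : Int)
    (acc : List (List String) × Int) (i : Int) : List (List String) × Int :=
  let sz := per + (if i < rem then (1 : Int) else 0)
  if acc.2 < num_items then
    let end_idx := min (acc.2 + sz) num_items
    let group := PySem.List.slice clean (some acc.2) (some end_idx)
    (if group ≠ [] then acc.1 ++ [group] else acc.1, end_idx)
  else acc

def auto_split_content_py (content_list : List String) (max_placeholders : Int) : List (List String) :=
  if content_list = [] then [[]]
  else
    let clean := content_list.filter (fun item => item != "" && PySem.Str.strip item != "")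
    if clean = [] then [[]]
    else
      let num_items : Int := clean.length
      if max_placeholders ≤ 1 then [clean]
      else
        let items_per := max 1 (PySem.Int.floordiv num_items max_placeholders)
        let remainder := PySem.Int.mod num_items max_placeholders
        let st := (PySem.List.pyRange 0 max_placeholders 1).foldl
          (pvStepA clean num_items items_per remainder) ([], 0)
        let groups := st.1
        let groups :=
          if (groups.length : Int) < max_placeholders ∧ 0 < num_items then
            if max_placeholders ≤ num_items then
              -- clean[i] is always in range here (0 ≤ i < num_items), so pyGetD is exact
              let g1 := (PySem.List.pyRange 0 (min num_items max_placeholders) 1).map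
                (fun i => [PySem.List.pyGetD clean i ""])
              (PySem.List.pyRange max_placeholders num_items 1).foldl
                (fun gs i =>
                  -- i % len(gs) is nonneg since len(gs) > 0 here, so .toNat is exact
                  gs.modify (PySem.Int.mod i (gs.length : Int)).toNat
                    (fun g => g ++ [PySem.List.pyGetD clean i ""])) g1
            else clean.map (fun item => [item])
          else groups
        if groups ≠ [] then groups else [[]]

-- ===== PORT B =====
-- B's while loop 'while start < n: ...' as recursion on the slot counter k; the loop is
-- only entered with k = max_placeholders ≥ 2 and k only counts down to 1 (the k = 1 branch
-- breaks), so the k = 0 case is unreachable for B's calls.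
def pvSplitLoop (clean : List String) (start : Nat) (k : Nat) : List (List String) :=
  if start < clean.length then
    match k with
    | 0 => []          -- unreachable for B's calls
    | 1 => [PySem.List.slice clean (some (start : Int)) none]
    | Nat.succ (Nat.succ k') =>
      let size : Int :=
        -(PySem.Int.floordiv ((start : Int) - (clean.length : Int)) ((k' + 2 : Nat) : Int))
      PySem.List.slice clean (some (start : Int)) (some ((start : Int) + size))
        :: pvSplitLoop clean (start + size.toNat) (k' + 1)
  else []

def auto_split_content_py_alt (content_list : List String) (max_placeholders : Int) : List (List String) :=
  if content_list = [] then [[]]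
  else
    let clean := content_list.filter (fun item => item != "" && PySem.Str.strip item != "")
    if clean = [] then [[]]
    else if max_placeholders ≤ 1 then [clean]
    else pvSplitLoop clean 0 max_placeholders.toNat   -- max_placeholders ≥ 2 here, so toNat is exact

-- ===== PRECONDITION & SPEC =====
def Spec_auto_split_content_py (content_list : List String) (max_placeholders : Int) (out : List (List String)) : Prop := out = auto_split_content_py_alt content_list max_placeholders
instance (content_list : List String) (max_placeholders : Int) (out : List (List String)) : Decidable (Spec_auto_split_content_py content_list max_placeholders out) := by unfold Spec_auto_split_content_py; infer_instance

-- ===== CLAIM (what is proved, stated in full; the proofs are below) =====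
def Claim_equal_auto_split_content_py : Prop := ∀ (content_list : List String) (max_placeholders : Int), Dom_auto_split_content_py content_list max_placeholders → Spec_auto_split_content_py content_list max_placeholders (auto_split_content_py content_list max_placeholders)

-- ===== LEMMAS AND PROOFS =====

-- canonical balanced grouping: group i is clean[per*i + min i rem : per*(i+1) + min (i+1) rem]
def pvF (clean : List String) (per rem : Nat) (i : Nat) : List String :=
  (clean.drop (per * i + min i rem)).take (per + if i < rem then 1 else 0)

def pvChunk (clean : List String) (k : Nat) : List (List String) :=
  (List.range k).map (pvF clean (clean.length / k) (clean.length % k))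

-- proof-side helper: the ceiling peel phrased on the remaining suffix itself
def pvSplitRec (items : List String) (k : Nat) : List (List String) :=
  if items = [] then []
  else
    match k with
    | 0 => []
    | 1 => [items]
    | Nat.succ (Nat.succ k') =>
      let size : Int := -(PySem.Int.floordiv (-(items.length : Int)) ((k' + 2 : Nat) : Int))
      PySem.List.slice items none (some size)
        :: pvSplitRec (PySem.List.slice items (some size) none) (k' + 1)

-- unfolding equations for pvSplitRec (the match reduces definitionally)
lemma pvSplitRec_one (items : List String) :
    pvSplitRec items 1 = if items = [] then [] else [items] := rfl

lemma pvSplitRec_two (items : List String) (k' : Nat) :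
    pvSplitRec items (k' + 2) =
      if items = [] then []
      else
        let size : Int := -(PySem.Int.floordiv (-(items.length : Int)) ((k' + 2 : Nat) : Int))
        PySem.List.slice items none (some size)
          :: pvSplitRec (PySem.List.slice items (some size) none) (k' + 1) := rfl

-- B's start/k loop visits exactly the suffixes pvSplitRec recurses on
lemma pvSplitLoop_eq (clean : List String) : ∀ (k start : Nat),
    pvSplitLoop clean start k = pvSplitRec (clean.drop start) k := by
  intro k
  induction k with
  | zero =>
    intro start
    unfold pvSplitLoop pvSplitRec
    split_ifs <;> rfl
  | succ k ih =>
    intro start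
    by_cases hs : start < clean.length
    · have hdne : clean.drop start ≠ [] := by
        intro hnil
        rw [List.drop_eq_nil_iff] at hnil
        omega
      match k, ih with
      | 0, ih =>
        unfold pvSplitLoop
        rw [if_pos hs, pvSplitRec_one, if_neg hdne, PySem.List.slice_from_natCast]
      | Nat.succ k'', ih =>
        unfold pvSplitLoop
        rw [if_pos hs, pvSplitRec_two, if_neg hdne]
        have hargs : -(((clean.drop start).length : Int))
            = (start : Int) - (clean.length : Int) := by
          simp only [List.length_drop]
          push_cast [Nat.cast_sub (le_of_lt hs)]
          ring
        simp only [hargs]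
        have hfd : PySem.Int.floordiv ((start : Int) - (clean.length : Int))
            ((k'' + 2 : Nat) : Int) < 0 := by
          rw [PySem.Int.floordiv_lt_iff_lt_mul (by push_cast; omega)]
          push_cast; omega
        set s : Int := -(PySem.Int.floordiv ((start : Int) - (clean.length : Int))
            ((k'' + 2 : Nat) : Int)) with hsdef
        have hs1 : 1 ≤ s := by omega
        congr 1
        · rw [PySem.List.slice_toNat _ (by omega : (0:Int) ≤ (start : Int)) (by omega),
            PySem.List.slice_to _ (by omega)]
          simp only [Int.toNat_natCast]
          congr 1
          omega
        · rw [ih, PySem.List.slice_from _ (by omega), List.drop_drop]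
    · have hnil : clean.drop start = [] := by
        rw [List.drop_eq_nil_iff]; omega
      unfold pvSplitLoop pvSplitRec
      rw [if_neg hs, hnil]
      simp

-- A's loop keeps (#groups : Int) ≤ start ≤ num_items
lemma pvInvA (clean : List String) (per rem : Int) (hper : 1 ≤ per) :
    ∀ (L : List Int) (acc : List (List String) × Int),
      (acc.1.length : Int) ≤ acc.2 → acc.2 ≤ (clean.length : Int) →
      ((L.foldl (pvStepA clean (clean.length : Int) per rem) acc).1.length : Int)
          ≤ (L.foldl (pvStepA clean (clean.length : Int) per rem) acc).2
        ∧ (L.foldl (pvStepA clean (clean.length : Int) per rem) acc).2 ≤ (clean.length : Int) := by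
  intro L
  induction L with
  | nil => intro acc h1 h2; exact ⟨h1, h2⟩
  | cons i L ih =>
    intro acc h1 h2
    simp only [List.foldl_cons]
    have hsz : 1 ≤ per + (if i < rem then (1 : Int) else 0) := by split_ifs <;> omega
    refine ih _ ?_ ?_
    · unfold pvStepA
      dsimp only
      by_cases hlt2 : acc.2 < (clean.length : Int)
      · rw [if_pos hlt2]
        have hlen2 : (if PySem.List.slice clean (some acc.2)
              (some (min (acc.2 + (per + (if i < rem then (1 : Int) else 0))) (clean.length : Int))) ≠ []
            then acc.1 ++ [PySem.List.slice clean (some acc.2)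
              (some (min (acc.2 + (per + (if i < rem then (1 : Int) else 0))) (clean.length : Int)))]
            else acc.1).length ≤ acc.1.length + 1 := by
          split_ifs <;> simp
        dsimp only
        omega
      · rw [if_neg hlt2]; exact h1
    · unfold pvStepA
      dsimp only
      by_cases hlt2 : acc.2 < (clean.length : Int)
      · rw [if_pos hlt2]
        exact min_le_right _ _
      · rw [if_neg hlt2]; exact h2

-- A's slicing loop computes exactly the canonical groups (enough-items case)
lemma pvFoldA (clean : List String) (per rem k : Nat) (hper : 1 ≤ per) (_hrem : rem < k)
    (hdm : per * k + rem = clean.length) :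
    ∀ (j : Nat), j ≤ k →
      (PySem.List.pyRange 0 (j : Int) 1).foldl
          (pvStepA clean (clean.length : Int) ((per : Nat) : Int) ((rem : Nat) : Int)) ([], 0)
        = ((List.range j).map (pvF clean per rem),
           ((per * j + min j rem : Nat) : Int)) := by
  intro j
  induction j with
  | zero =>
    intro _
    rw [show ((0 : Nat) : Int) = 0 by simp, PySem.List.pyRange_one_eq_nil (by omega)]
    simp
  | succ j ih =>
    intro hj
    have hj' : j ≤ k := by omega
    have hjk : j < k := by omega
    have hA2 : per * (j + 1) = per * j + per := by ring
    have hA3 : per * (j + 1) ≤ per * k := Nat.mul_le_mul_left per (by omega)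
    have hPjlt : per * j + min j rem < clean.length := by omega
    have hPj1le : per * (j + 1) + min (j + 1) rem ≤ clean.length := by omega
    rw [show (((j + 1 : Nat)) : Int) = (j : Int) + 1 by push_cast; ring,
      PySem.List.pyRange_one_succ_right (by omega : (0 : Int) ≤ (j : Int)),
      List.foldl_append, ih hj']
    simp only [List.foldl_cons, List.foldl_nil]
    unfold pvStepA
    dsimp only
    rw [if_pos (by exact_mod_cast hPjlt)]
    have hA2' : (per : Int) * ((j : Int) + 1) = (per : Int) * (j : Int) + per := by ring
    have hsum : ((per * j + min j rem : Nat) : Int)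
        + ((per : Int) + (if (j : Int) < (rem : Int) then (1 : Int) else 0))
        = ((per * (j + 1) + min (j + 1) rem : Nat) : Int) := by
      push_cast
      split_ifs <;> omega
    rw [hsum, show min ((per * (j + 1) + min (j + 1) rem : Nat) : Int) ((clean.length : Int))
        = ((per * (j + 1) + min (j + 1) rem : Nat) : Int) from
        min_eq_left (by exact_mod_cast hPj1le)]
    rw [PySem.List.slice_natCast]
    have hdiff : per * (j + 1) + min (j + 1) rem - (per * j + min j rem)
        = per + (if j < rem then 1 else 0) := by
      split_ifs with hc <;> omega
    rw [hdiff]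
    have hgrp : (clean.drop (per * j + min j rem)).take (per + if j < rem then 1 else 0) ≠ [] := by
      intro hnil
      have := congrArg List.length hnil
      simp only [List.length_take, List.length_drop, List.length_nil] at this
      split_ifs at this <;> omega
    rw [if_pos (show (clean.drop (per * j + min j rem)).take
          (per + if j < rem then 1 else 0) ≠ [] from hgrp)]
    refine Prod.ext ?_ rfl
    show (List.range j).map (pvF clean per rem) ++ [_] = (List.range (j + 1)).map (pvF clean per rem)
    rw [List.range_succ, List.map_append, List.map_singleton]
    rfl

-- B's recursion yields singletons when there are fewer items than slots
lemma pvSplitSmall : ∀ (k : Nat) (items : List String), items.length < k →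
    pvSplitRec items k = items.map (fun x => [x]) := by
  intro k
  induction k with
  | zero => intro items h; omega
  | succ k ih =>
    intro items h
    by_cases hi : items = []
    · subst hi; unfold pvSplitRec; simp
    match k, h, ih with
    | 0, h, ih =>
      have := List.length_pos_of_ne_nil hi
      omega
    | Nat.succ k'', h, ih =>
      rw [pvSplitRec_two, if_neg hi]
      obtain ⟨x, t, rfl⟩ := List.exists_cons_of_ne_nil hi
      have hlen : (x :: t).length = t.length + 1 := rfl
      have hsz : -(PySem.Int.floordiv (-((x :: t).length : Int)) ((k'' + 2 : Nat) : Int)) = 1 := by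
        rw [PySem.Int.neg_floordiv_neg_eq_iff_of_pos (by push_cast; omega)]
        constructor
        · push_cast; omega
        · push_cast; omega
      simp only [hsz]
      rw [PySem.List.slice_to _ (by omega : (0:Int) ≤ 1),
        PySem.List.slice_from _ (by omega : (0:Int) ≤ 1)]
      simp only [Int.toNat_one, List.take_succ_cons, List.take_zero, List.drop_succ_cons,
        List.drop_zero, List.map_cons]
      rw [ih t (by simp at h; omega)]

-- B's recursion computes the canonical groups when there are enough items
lemma pvSplitBig : ∀ (k' : Nat) (items : List String), k' + 1 ≤ items.length →
    pvSplitRec items (k' + 1) = pvChunk items (k' + 1) := by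
  intro k'
  induction k' with
  | zero =>
    intro items h
    have hi : items ≠ [] := by intro hnil; rw [hnil] at h; simp at h
    rw [pvSplitRec_one, if_neg hi]
    simp [pvChunk, pvF, List.take_of_length_le]
  | succ j ih =>
    intro items h
    have hi : items ≠ [] := by intro hnil; rw [hnil] at h; simp at h
    set n := items.length with hn
    set per := n / (j + 2) with hper
    set rem := n % (j + 2) with hrem
    have hdm : per * (j + 2) + rem = n := by
      rw [hper, hrem, Nat.mul_comm]; exact Nat.div_add_mod n (j + 2)
    have hremlt : rem < j + 2 := Nat.mod_lt _ (by omega)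
    clear_value n per rem
    have hper1 : 1 ≤ per := by
      rw [hper, Nat.one_le_div_iff (by omega)]; omega
    -- the head-group size is the ceiling ⌈n/(j+2)⌉ = per + (1 if rem > 0)
    set q := per + (if 0 < rem then 1 else 0) with hq
    clear_value q
    have hPC : (j + 1) * per = per * (j + 1) := Nat.mul_comm _ _
    have hP : per * (j + 2) = per * (j + 1) + per := by ring
    have hQ : (j + 1) ≤ per * (j + 1) := Nat.le_mul_of_pos_left _ (by omega)
    have hqn : q ≤ n := by rw [hq]; split_ifs <;> omega
    have hsz : -(PySem.Int.floordiv (-(n : Int)) ((j + 2 : Nat) : Int)) = (q : Nat) := by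
      rw [PySem.Int.neg_floordiv_neg_eq_iff_of_pos (by push_cast; omega)]
      have e1 : ((q : Int) - 1) * ((j + 2 : Nat) : Int)
          = ((q * (j + 2) : Nat) : Int) - ((j + 2 : Nat) : Int) := by push_cast; ring
      have e2 : (q : Int) * ((j + 2 : Nat) : Int) = ((q * (j + 2) : Nat) : Int) := by
        push_cast; ring
      have e3 : q * (j + 2) = per * (j + 2) + (if 0 < rem then j + 2 else 0) := by
        rw [hq]; split_ifs <;> ring
      constructor
      · rw [e1]; split_ifs at e3 <;> omega
      · rw [e2]; split_ifs at e3 <;> omega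
    rw [pvSplitRec_two, if_neg hi]
    simp only [← hn, hsz]
    rw [PySem.List.slice_to_natCast, PySem.List.slice_from_natCast]
    have hlen_drop : (items.drop q).length = n - q := by simp [hn]
    have hrec : j + 1 ≤ (items.drop q).length := by
      rw [hlen_drop, hq]; split_ifs <;> omega
    rw [ih _ hrec]
    -- remaining per/rem after removing the head group
    set r := rem - (if 0 < rem then 1 else 0) with hr
    clear_value r
    have hdm' : (items.drop q).length = (j + 1) * per + r := by
      rw [hlen_drop, hr, hq]; split_ifs <;> omega
    have hrlt : r < j + 1 := by rw [hr]; split_ifs <;> omega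
    have hper' : (items.drop q).length / (j + 1) = per := by
      rw [hdm', Nat.mul_add_div (by omega), Nat.div_eq_of_lt hrlt, Nat.add_zero]
    have hrem' : (items.drop q).length % (j + 1) = r := by
      rw [hdm', Nat.mul_add_mod, Nat.mod_eq_of_lt hrlt]
    unfold pvChunk
    rw [hper', hrem', ← hn, ← hper, ← hrem]
    conv_rhs => rw [List.range_succ_eq_map, List.map_cons, List.map_map]
    congr 1
    · -- head group
      unfold pvF
      simp only [Nat.mul_zero, Nat.zero_min, Nat.zero_add, List.drop_zero, hq]
    · -- remaining groups, shifted by q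
      apply List.map_congr_left
      intro i _
      simp only [Function.comp, Nat.succ_eq_add_one]
      unfold pvF
      rw [List.drop_drop]
      have hm : per * (i + 1) = per * i + per := by ring
      congr 1
      · -- sizes agree
        rw [hr]; split_ifs <;> omega
      · -- start indices agree
        congr 1
        rw [hq, hr]; split_ifs <;> omega

-- ===== VERDICT (by name: the statement is the Claim_ definition above) =====
theorem auto_split_content_py_spec : Claim_equal_auto_split_content_py := by
  intro cl m _dom
  unfold Spec_auto_split_content_py auto_split_content_py auto_split_content_py_alt
  by_cases hcl : cl = []
  · simp [hcl]
  rw [if_neg hcl, if_neg hcl]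
  simp only []
  set clean := cl.filter (fun item => item != "" && PySem.Str.strip item != "") with hclean
  by_cases hc : clean = []
  · simp [hc]
  rw [if_neg hc, if_neg hc]
  by_cases hm1 : m ≤ 1
  · simp [hm1]
  rw [if_neg hm1, if_neg hm1]
  have hm : 2 ≤ m := by omega
  have hmk : ((m.toNat : Nat) : Int) = m := Int.toNat_of_nonneg (by omega)
  have hk2 : 2 ≤ m.toNat := by omega
  have hnpos : 0 < clean.length := List.length_pos_of_ne_nil hc
  by_cases hlt : (clean.length : Int) < m
  · -- fewer items than placeholders: A redistributes into singletons, B peels singletons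
    have hper : 1 ≤ max 1 (PySem.Int.floordiv (clean.length : Int) m) := le_max_left _ _
    obtain ⟨hle, hle2⟩ := pvInvA clean
      (max 1 (PySem.Int.floordiv (clean.length : Int) m)) (PySem.Int.mod (clean.length : Int) m)
      hper (PySem.List.pyRange 0 m 1) ([], 0) (by simp) (by omega)
    have hmapne : clean.map (fun item => [item]) ≠ [] := by simpa using hc
    rw [if_pos (And.intro (by omega) (by exact_mod_cast hnpos)),
      if_neg (show ¬ m ≤ (clean.length : Int) by omega), if_pos hmapne]
    rw [pvSplitLoop_eq clean m.toNat 0, List.drop_zero, pvSplitSmall m.toNat clean (by omega)]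
  · -- enough items: A's slicing loop builds the canonical groups; so does B's recursion
    have hkn : m.toNat ≤ clean.length := by omega
    rw [← hmk]
    rw [PySem.Int.floordiv_natCast, PySem.Int.mod_natCast]
    have hper1 : 1 ≤ clean.length / m.toNat := (Nat.one_le_div_iff (by omega)).2 hkn
    rw [max_eq_right (by exact_mod_cast hper1)]
    have hfold := pvFoldA clean (clean.length / m.toNat) (clean.length % m.toNat) m.toNat
      hper1 (Nat.mod_lt _ (by omega))
      (by rw [Nat.mul_comm]; exact Nat.div_add_mod clean.length m.toNat)
      m.toNat le_rfl
    rw [hfold]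
    simp only []
    have hlenk : ((List.range m.toNat).map
        (pvF clean (clean.length / m.toNat) (clean.length % m.toNat))).length = m.toNat := by
      simp
    rw [if_neg (show ¬ ((((List.range m.toNat).map
        (pvF clean (clean.length / m.toNat) (clean.length % m.toNat))).length : Int)
          < ((m.toNat : Nat) : Int) ∧ 0 < (clean.length : Int)) by
      rw [hlenk]; intro hcon; exact absurd hcon.1 (by omega))]
    have hne : (List.range m.toNat).map
        (pvF clean (clean.length / m.toNat) (clean.length % m.toNat)) ≠ [] := by
      intro hnil
      have := congrArg List.length hnil
      rw [hlenk] at this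
      simp at this
      omega
    rw [if_pos hne]
    have hB : pvSplitLoop clean 0 ((m.toNat : Int)).toNat = pvChunk clean m.toNat := by
      rw [Int.toNat_natCast, pvSplitLoop_eq clean m.toNat 0, List.drop_zero,
        show m.toNat = (m.toNat - 1) + 1 by omega]
      exact pvSplitBig _ clean (by omega)
    rw [hB]
    unfold pvChunk
    rfl
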